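-- pv_equiv track=rewrite | github.com/jennyzzt/LLM_debate_on_ARC | ARC_gen_agents2_rounds2_openai/b2862040/agent0/algo0.py | solve
-- ===== SOURCE A (Python) =====
-- def solve(input_grid):
--     # Copy the input grid to the output grid
--     output_grid = [row[:] for row in input_grid]
--
--     # Function to check if a cell is part of a larger shape
--     def is_part_of_shape(x, y):
--         if x < 0 or x >= len(input_grid) or y < 0 or y >= len(input_grid[0]) or input_grid[x][y] != 1:
--             return False
--         # Check surrounding cells to determine if part of a shape
--         neighbors = [(0, -1), (0, 1), (-1, 0), (1, 0)]  # Left, Right, Up, Down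
--         for dx, dy in neighbors:
--             nx, ny = x + dx, y + dy
--             if 0 <= nx < len(input_grid) and 0 <= ny < len(input_grid[0]) and input_grid[nx][ny] == 9:
--                 return False
--         return True
--
--     # Transform the grid
--     for i in range(len(input_grid)):
--         for j in range(len(input_grid[0])):
--             if input_grid[i][j] == 1 and is_part_of_shape(i, j):
--                 output_grid[i][j] = 8
--
--     return output_grid
-- ===== SOURCE B (Python) =====
-- def solve(input_grid):
--     h = len(input_grid)
--     w = len(input_grid[0]) if input_grid else 0
--     # First pass: every 9-cell protects its in-bounds orthogonal 1-neighbors.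
--     protected = set()
--     for i in range(h):
--         for j in range(w):
--             if input_grid[i][j] == 9:
--                 for ni, nj in ((i - 1, j), (i + 1, j), (i, j - 1), (i, j + 1)):
--                     if 0 <= ni < h and 0 <= nj < w and input_grid[ni][nj] == 1:
--                         protected.add((ni, nj))
--     # Second pass: recolor every unprotected 1-cell to 8.
--     output_grid = [row[:] for row in input_grid]
--     for i in range(h):
--         for j in range(w):
--             if input_grid[i][j] == 1 and (i, j) not in protected:
--                 output_grid[i][j] = 8
--     return output_grid
-- ===== Notes on version B (the rewrite author's own statement) =====
-- stated objective: alternative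
-- what changed: Instead of querying each 1-cell's four neighbors for a 9, B inverts the traversal: one pass over the 9-cells builds a 'protected' set of their in-bounds 1-neighbors, and a second pass recolors every 1-cell not in that set to 8.
import Mathlib
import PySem

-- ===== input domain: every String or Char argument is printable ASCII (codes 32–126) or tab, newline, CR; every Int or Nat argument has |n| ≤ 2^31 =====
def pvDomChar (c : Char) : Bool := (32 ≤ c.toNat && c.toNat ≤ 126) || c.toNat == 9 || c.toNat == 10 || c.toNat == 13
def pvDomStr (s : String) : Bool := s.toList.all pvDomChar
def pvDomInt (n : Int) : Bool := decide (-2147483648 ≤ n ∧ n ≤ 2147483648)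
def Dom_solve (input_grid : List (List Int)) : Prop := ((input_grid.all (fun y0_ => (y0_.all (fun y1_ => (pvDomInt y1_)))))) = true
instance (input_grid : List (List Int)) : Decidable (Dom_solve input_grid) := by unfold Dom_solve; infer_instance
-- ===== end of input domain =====

-- B inverts A's traversal: one pass over 9-cells builds a protected set of their 1-neighbors,
-- then one pass recolors unprotected 1-cells to 8 (alternative decomposition, same cost).


-- ===== PORT A =====
-- len(input_grid[0]); exact whenever input_grid ≠ [] (guaranteed by Pre_solve)
def pvWidth (g : List (List Int)) : Int := (((PySem.List.pyGet? g 0).getD []).length : Int)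

-- input_grid[x][y]; exact wherever Python does not raise (all accesses admitted by Pre_solve)
def pvCell (g : List (List Int)) (x y : Int) : Int :=
  PySem.List.pyGetD (PySem.List.pyGetD g x []) y 0

-- A's is_part_of_shape: early False-returns of the neighbor loop become an `any`
def pvIsPartOfShape (g : List (List Int)) (x y : Int) : Bool :=
  if x < 0 ∨ x ≥ (g.length : Int) ∨ y < 0 ∨ y ≥ pvWidth g ∨ pvCell g x y ≠ 1 then false
  else if ([((0:Int),(-1:Int)), (0,1), (-1,0), (1,0)]).any (fun d =>
      decide (0 ≤ x + d.1) && decide (x + d.1 < (g.length : Int)) &&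
      decide (0 ≤ y + d.2) && decide (y + d.2 < pvWidth g) &&
      (pvCell g (x + d.1) (y + d.2) == 9)) then false
  else true

-- the in-place writes output_grid[i][j] = 8 become List.modify/List.set on the copy
def solve (input_grid : List (List Int)) : List (List Int) :=
  (PySem.List.pyRange 0 (input_grid.length : Int) 1).foldl (fun out i =>
    (PySem.List.pyRange 0 (pvWidth input_grid) 1).foldl (fun out j =>
      if pvCell input_grid i j == 1 && pvIsPartOfShape input_grid i j then
        out.modify i.toNat (fun row => row.set j.toNat 8)
      else out) out) input_grid

-- ===== PORT B =====
-- first pass of Source B: the protected set built by scanning the 9-cells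
def pvProtected (g : List (List Int)) : PySem.Set (Int × Int) :=
  (PySem.List.pyRange 0 (g.length : Int) 1).foldl (fun s i =>
    (PySem.List.pyRange 0 (pvWidth g) 1).foldl (fun s j =>
      if pvCell g i j == 9 then
        ([(i - 1, j), (i + 1, j), (i, j - 1), (i, j + 1)] : List (Int × Int)).foldl (fun s p =>
          if decide (0 ≤ p.1) && decide (p.1 < (g.length : Int)) &&
             decide (0 ≤ p.2) && decide (p.2 < pvWidth g) &&
             (pvCell g p.1 p.2 == 1) then PySem.Set.add s p
          else s) s
      else s) s) PySem.Set.empty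

def solve_alt (input_grid : List (List Int)) : List (List Int) :=
  let prot := pvProtected input_grid
  (PySem.List.pyRange 0 (input_grid.length : Int) 1).foldl (fun out i =>
    (PySem.List.pyRange 0 (pvWidth input_grid) 1).foldl (fun out j =>
      if pvCell input_grid i j == 1 && !(PySem.Set.contains prot (i, j)) then
        out.modify i.toNat (fun row => row.set j.toNat 8)
      else out) out) input_grid

-- ===== PRECONDITION & SPEC =====
-- Python A raises IndexError exactly on grids where some row is shorter than the
-- first row (it reads input_grid[i][j] for every j < len(input_grid[0])).
def Pre_solve (input_grid : List (List Int)) : Prop :=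
  ∀ row ∈ input_grid, (input_grid.headD []).length ≤ row.length
instance (input_grid : List (List Int)) : Decidable (Pre_solve input_grid) := by
  unfold Pre_solve; infer_instance

def pvWitness_solve : List (List Int) := [[9, 1, 0], [1, 2, 1]]

def Spec_solve (input_grid : List (List Int)) (out : List (List Int)) : Prop := out = solve_alt input_grid
instance (input_grid : List (List Int)) (out : List (List Int)) : Decidable (Spec_solve input_grid out) := by unfold Spec_solve; infer_instance

-- ===== CLAIM (what is proved, stated in full; the proofs are below) =====
def Claim_equal_solve : Prop := ∀ (input_grid : List (List Int)), Dom_solve input_grid → Pre_solve input_grid → Spec_solve input_grid (solve input_grid)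

-- ===== LEMMAS AND PROOFS =====

-- membership after a fold whose step adds at most the current element's contribution
theorem mem_foldl_step {α β : Type} (l : List β) (step : List α → β → List α)
    (P : β → Prop) (y : α)
    (hstep : ∀ s b, y ∈ step s b ↔ y ∈ s ∨ P b) :
    ∀ s : List α, (y ∈ l.foldl step s ↔ y ∈ s ∨ ∃ b ∈ l, P b) := by
  induction l with
  | nil => intro s; simp
  | cons b t ih =>
    intro s
    simp only [List.foldl_cons, ih, hstep, List.mem_cons]
    constructor
    · rintro ((h | h) | ⟨c, hc, hP⟩)
      · exact Or.inl h
      · exact Or.inr ⟨b, Or.inl rfl, h⟩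
      · exact Or.inr ⟨c, Or.inr hc, hP⟩
    · rintro (h | ⟨c, (rfl | hc), hP⟩)
      · exact Or.inl (Or.inl h)
      · exact Or.inl (Or.inr hP)
      · exact Or.inr ⟨c, hc, hP⟩

-- characterization of the protected set: exactly the in-bounds 1-cells orthogonally next to a 9
theorem mem_protected (g : List (List Int)) (q : Int × Int) :
    q ∈ pvProtected g ↔
      ∃ i, (0 ≤ i ∧ i < (g.length : Int)) ∧
      ∃ j, (0 ≤ j ∧ j < pvWidth g) ∧ pvCell g i j = 9 ∧
      ∃ p ∈ ([(i - 1, j), (i + 1, j), (i, j - 1), (i, j + 1)] : List (Int × Int)),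
        (0 ≤ p.1 ∧ p.1 < (g.length : Int) ∧ 0 ≤ p.2 ∧ p.2 < pvWidth g ∧ pvCell g p.1 p.2 = 1) ∧ q = p := by
  have hnb : ∀ (i j : Int) (s : PySem.Set (Int × Int)),
      q ∈ (([(i - 1, j), (i + 1, j), (i, j - 1), (i, j + 1)] : List (Int × Int)).foldl (fun s p =>
          if decide (0 ≤ p.1) && decide (p.1 < (g.length : Int)) &&
             decide (0 ≤ p.2) && decide (p.2 < pvWidth g) &&
             (pvCell g p.1 p.2 == 1) then PySem.Set.add s p
          else s) s) ↔ q ∈ s ∨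
        ∃ p ∈ ([(i - 1, j), (i + 1, j), (i, j - 1), (i, j + 1)] : List (Int × Int)),
          (0 ≤ p.1 ∧ p.1 < (g.length : Int) ∧ 0 ≤ p.2 ∧ p.2 < pvWidth g ∧ pvCell g p.1 p.2 = 1) ∧ q = p := by
    intro i j s
    refine mem_foldl_step _ _ _ _ ?_ s
    intro s p
    by_cases hc : (0 ≤ p.1 ∧ p.1 < (g.length : Int) ∧ 0 ≤ p.2 ∧ p.2 < pvWidth g ∧ pvCell g p.1 p.2 = 1)
    · rw [if_pos (by simp only [Bool.and_eq_true, decide_eq_true_eq, beq_iff_eq]; tauto),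
        PySem.Set.mem_add]
      constructor
      · rintro (h | rfl)
        · exact Or.inl h
        · exact Or.inr ⟨hc, rfl⟩
      · rintro (h | ⟨_, rfl⟩)
        · exact Or.inl h
        · exact Or.inr rfl
    · rw [if_neg (by simp only [Bool.and_eq_true, decide_eq_true_eq, beq_iff_eq]; tauto)]
      constructor
      · exact Or.inl
      · rintro (h | ⟨hb, rfl⟩)
        · exact h
        · exact absurd hb hc
  have hinner : ∀ (i : Int) (s : PySem.Set (Int × Int)),
      q ∈ ((PySem.List.pyRange 0 (pvWidth g) 1).foldl (fun s j =>
        if pvCell g i j == 9 then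
          ([(i - 1, j), (i + 1, j), (i, j - 1), (i, j + 1)] : List (Int × Int)).foldl (fun s p =>
            if decide (0 ≤ p.1) && decide (p.1 < (g.length : Int)) &&
               decide (0 ≤ p.2) && decide (p.2 < pvWidth g) &&
               (pvCell g p.1 p.2 == 1) then PySem.Set.add s p
            else s) s
        else s) s) ↔ q ∈ s ∨
        ∃ j, (0 ≤ j ∧ j < pvWidth g) ∧ pvCell g i j = 9 ∧
          ∃ p ∈ ([(i - 1, j), (i + 1, j), (i, j - 1), (i, j + 1)] : List (Int × Int)),
            (0 ≤ p.1 ∧ p.1 < (g.length : Int) ∧ 0 ≤ p.2 ∧ p.2 < pvWidth g ∧ pvCell g p.1 p.2 = 1) ∧ q = p := by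
    intro i s
    have hstep : ∀ (s : PySem.Set (Int × Int)) (j : Int),
        q ∈ (if pvCell g i j == 9 then
          ([(i - 1, j), (i + 1, j), (i, j - 1), (i, j + 1)] : List (Int × Int)).foldl (fun s p =>
            if decide (0 ≤ p.1) && decide (p.1 < (g.length : Int)) &&
               decide (0 ≤ p.2) && decide (p.2 < pvWidth g) &&
               (pvCell g p.1 p.2 == 1) then PySem.Set.add s p
            else s) s
        else s) ↔ q ∈ s ∨ (pvCell g i j = 9 ∧
        ∃ p ∈ ([(i - 1, j), (i + 1, j), (i, j - 1), (i, j + 1)] : List (Int × Int)),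
          (0 ≤ p.1 ∧ p.1 < (g.length : Int) ∧ 0 ≤ p.2 ∧ p.2 < pvWidth g ∧ pvCell g p.1 p.2 = 1) ∧ q = p) := by
      intro s j
      by_cases h9 : pvCell g i j = 9
      · rw [if_pos (by simpa using h9), hnb i j s]
        tauto
      · rw [if_neg (by simpa using h9)]
        tauto
    rw [mem_foldl_step _ _
      (fun j => pvCell g i j = 9 ∧
        ∃ p ∈ ([(i - 1, j), (i + 1, j), (i, j - 1), (i, j + 1)] : List (Int × Int)),
          (0 ≤ p.1 ∧ p.1 < (g.length : Int) ∧ 0 ≤ p.2 ∧ p.2 < pvWidth g ∧ pvCell g p.1 p.2 = 1) ∧ q = p)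
      q (fun s j => hstep s j) s]
    simp only [PySem.List.mem_pyRange_one]
  unfold pvProtected
  rw [mem_foldl_step _ _
    (fun i => ∃ j, (0 ≤ j ∧ j < pvWidth g) ∧ pvCell g i j = 9 ∧
      ∃ p ∈ ([(i - 1, j), (i + 1, j), (i, j - 1), (i, j + 1)] : List (Int × Int)),
        (0 ≤ p.1 ∧ p.1 < (g.length : Int) ∧ 0 ≤ p.2 ∧ p.2 < pvWidth g ∧ pvCell g p.1 p.2 = 1) ∧ q = p)
    q (fun s i => hinner i s) PySem.Set.empty]
  simp only [PySem.Set.empty, List.not_mem_nil, false_or, PySem.List.mem_pyRange_one]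

-- the two recolor conditions agree on every cell of the scanned rectangle
theorem cond_eq (g : List (List Int)) (i j : Int)
    (hi0 : 0 ≤ i) (hih : i < (g.length : Int)) (hj0 : 0 ≤ j) (hjw : j < pvWidth g) :
    (pvCell g i j == 1 && pvIsPartOfShape g i j)
      = (pvCell g i j == 1 && !(PySem.Set.contains (pvProtected g) (i, j))) := by
  by_cases h1 : pvCell g i j = 1
  · simp only [h1, beq_self_eq_true, Bool.true_and]
    unfold pvIsPartOfShape
    rw [if_neg (by push Not; exact ⟨hi0, hih, hj0, hjw, by rw [h1]⟩)]
    have hmem : ((([((0:Int),(-1:Int)), (0,1), (-1,0), (1,0)]).any (fun d =>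
        decide (0 ≤ i + d.1) && decide (i + d.1 < (g.length : Int)) &&
        decide (0 ≤ j + d.2) && decide (j + d.2 < pvWidth g) &&
        (pvCell g (i + d.1) (j + d.2) == 9)) = true) ↔ (i, j) ∈ pvProtected g) := by
      rw [List.any_eq_true, mem_protected]
      constructor
      · rintro ⟨d, hd, hb⟩
        simp only [Bool.and_eq_true, decide_eq_true_eq, beq_iff_eq] at hb
        obtain ⟨⟨⟨⟨hb1, hb2⟩, hb3⟩, hb4⟩, hb9⟩ := hb
        refine ⟨i + d.1, ⟨hb1, hb2⟩, j + d.2, ⟨hb3, hb4⟩, hb9, (i, j), ?_,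
          ⟨hi0, hih, hj0, hjw, h1⟩, rfl⟩
        fin_cases hd <;>
          simp only [List.mem_cons, List.not_mem_nil, or_false, Prod.mk.injEq] <;> omega
      · rintro ⟨x, ⟨hx1, hx2⟩, y, ⟨hy1, hy2⟩, h9, p, hp, hpb, hqp⟩
        subst hqp
        simp only [List.mem_cons, List.not_mem_nil, or_false, Prod.mk.injEq] at hp
        rcases hp with ⟨e1, e2⟩ | ⟨e1, e2⟩ | ⟨e1, e2⟩ | ⟨e1, e2⟩
        · -- p = (x-1, y): the 9 is below, d = (1,0)
          refine ⟨(1, 0), by simp, ?_⟩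
          simp only [Bool.and_eq_true, decide_eq_true_eq, beq_iff_eq]
          refine ⟨⟨⟨⟨by omega, by omega⟩, by omega⟩, by omega⟩, ?_⟩
          rw [show i + (1:Int) = x by omega, show j + (0:Int) = y by omega]; exact h9
        · -- p = (x+1, y): the 9 is above, d = (-1,0)
          refine ⟨(-1, 0), by simp, ?_⟩
          simp only [Bool.and_eq_true, decide_eq_true_eq, beq_iff_eq]
          refine ⟨⟨⟨⟨by omega, by omega⟩, by omega⟩, by omega⟩, ?_⟩
          rw [show i + (-1:Int) = x by omega, show j + (0:Int) = y by omega]; exact h9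
        · -- p = (x, y-1): the 9 is to the right, d = (0,1)
          refine ⟨(0, 1), by simp, ?_⟩
          simp only [Bool.and_eq_true, decide_eq_true_eq, beq_iff_eq]
          refine ⟨⟨⟨⟨by omega, by omega⟩, by omega⟩, by omega⟩, ?_⟩
          rw [show i + (0:Int) = x by omega, show j + (1:Int) = y by omega]; exact h9
        · -- p = (x, y+1): the 9 is to the left, d = (0,-1)
          refine ⟨(0, -1), by simp, ?_⟩
          simp only [Bool.and_eq_true, decide_eq_true_eq, beq_iff_eq]
          refine ⟨⟨⟨⟨by omega, by omega⟩, by omega⟩, by omega⟩, ?_⟩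
          rw [show i + (0:Int) = x by omega, show j + (-1:Int) = y by omega]; exact h9
    by_cases hmemb : (i, j) ∈ pvProtected g
    · have hany := hmem.mpr hmemb
      have hc : PySem.Set.contains (pvProtected g) (i, j) = true :=
        (PySem.Set.contains_iff _ _).mpr hmemb
      rw [if_pos hany, hc]; rfl
    · have hany : ¬ (([((0:Int),(-1:Int)), (0,1), (-1,0), (1,0)]).any (fun d =>
          decide (0 ≤ i + d.1) && decide (i + d.1 < (g.length : Int)) &&
          decide (0 ≤ j + d.2) && decide (j + d.2 < pvWidth g) &&
          (pvCell g (i + d.1) (j + d.2) == 9)) = true) := fun h => hmemb (hmem.mp h)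
      have hc : PySem.Set.contains (pvProtected g) (i, j) = false :=
        Bool.eq_false_iff.mpr (fun h => hmemb ((PySem.Set.contains_iff _ _).mp h))
      rw [if_neg hany, hc]; rfl
  · have h1f : (pvCell g i j == 1) = false := by simpa using h1
    rw [h1f, Bool.false_and, Bool.false_and]

-- ===== VERDICT (by name: the statement is the Claim_ definition above) =====
theorem solve_spec : Claim_equal_solve := by
  intro g _ _
  unfold Spec_solve solve solve_alt
  apply PySem.List.foldl_congr_mem
  intro out i hi
  apply PySem.List.foldl_congr_mem
  intro out j hj
  rw [PySem.List.mem_pyRange_one] at hi hj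
  rw [cond_eq g i j hi.1 hi.2 hj.1 hj.2]
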